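-- pv_equiv track=rewrite | github.com/Alegruz/Game-AI-Track | 3_1/CSE304_ALGORITHM_ANALYSIS/Homeworks/hw1.py | algorithm_recursive
-- ===== SOURCE A (Python) =====
-- def algorithm_recursive(n: int) -> int:
--     if n == 1 or n == 2:
--         return 1
--     else:
--         sum: int = 0
--         for i in range(1, n):
--             sum += algorithm_recursive(i)
--         return sum
-- ===== SOURCE B (Python) =====
-- def algorithm_recursive(n: int) -> int:
--     # closed form: a(1)=a(2)=1, a(n)=2^(n-2) for n>=3, 0 for n<=0
--     if n <= 0:
--         return 0
--     if n <= 2: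
--         return 1
--     return 2 ** (n - 2)
-- ===== Notes on version B (the rewrite author's own statement) =====
-- stated objective: faster
-- what changed: Replaced the exponential recursion that re-sums all prior terms by a direct closed-form computation (a single integer power past the base cases); intended as asymptotically faster — in timing runs A times out on inputs B answers instantly.
import Mathlib
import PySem

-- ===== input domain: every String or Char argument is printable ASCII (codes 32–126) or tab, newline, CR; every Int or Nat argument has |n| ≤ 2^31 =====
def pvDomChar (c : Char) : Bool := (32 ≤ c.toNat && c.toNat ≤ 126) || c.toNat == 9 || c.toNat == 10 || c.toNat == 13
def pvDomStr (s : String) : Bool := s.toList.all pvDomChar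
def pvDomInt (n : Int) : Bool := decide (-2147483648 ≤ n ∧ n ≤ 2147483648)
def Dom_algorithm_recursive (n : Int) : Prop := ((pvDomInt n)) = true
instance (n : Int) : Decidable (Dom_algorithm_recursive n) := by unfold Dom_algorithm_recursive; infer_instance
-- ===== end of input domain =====

-- B replaces A's exponential recursion by a closed-form power; intended as asymptotically faster (in timing runs A times out on inputs B answers instantly).


-- ===== PORT A =====
-- fuel makes the recursion total; n.toNat + 1 always suffices (each call descends to i < n, i ≥ 1)
def arecGo : Nat → Int → Int
  | 0, _ => 0
  | f+1, n =>
    if n = 1 ∨ n = 2 then 1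
    else (PySem.List.pyRange 1 n 1).foldl (fun s i => s + arecGo f i) 0

def algorithm_recursive (n : Int) : Int := arecGo (n.toNat + 1) n

-- ===== PORT B =====
def algorithm_recursive_alt (n : Int) : Int :=
  if n ≤ 0 then 0
  else if n ≤ 2 then 1
  else 2 ^ (n - 2).toNat

-- ===== PRECONDITION & SPEC =====
def Spec_algorithm_recursive (n : Int) (out : Int) : Prop := out = algorithm_recursive_alt n
instance (n : Int) (out : Int) : Decidable (Spec_algorithm_recursive n out) := by unfold Spec_algorithm_recursive; infer_instance

-- ===== CLAIM (what is proved, stated in full; the proofs are below) =====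
def Claim_equal_algorithm_recursive : Prop := ∀ (n : Int), Dom_algorithm_recursive n → Spec_algorithm_recursive n (algorithm_recursive n)

-- ===== LEMMAS AND PROOFS =====

-- sum of the closed form over range(1, n) for n ≥ 3 is 2^(n-2)
lemma arec_sum_closed (n : Int) (hn : 3 ≤ n) :
    (PySem.List.pyRange 1 n 1).foldl (fun s i => s + algorithm_recursive_alt i) 0
      = 2 ^ (n - 2).toNat := by
  have h : ∀ k : Nat, (PySem.List.pyRange 1 (3 + (k : Int)) 1).foldl
      (fun s i => s + algorithm_recursive_alt i) 0 = 2 ^ (3 + (k : Int) - 2).toNat := by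
    intro k
    induction k with
    | zero => decide
    | succ k ih =>
      have hstep : (3 + ((k + 1 : Nat) : Int)) = (3 + (k : Int)) + 1 := by push_cast; ring
      rw [hstep, PySem.List.pyRange_one_succ_right (by omega)]
      rw [List.foldl_append, ih]
      have halt : algorithm_recursive_alt (3 + (k : Int)) = 2 ^ (3 + (k : Int) - 2).toNat := by
        unfold algorithm_recursive_alt
        rw [if_neg (by omega), if_neg (by omega)]
      simp only [List.foldl_cons, List.foldl_nil, halt]
      have h1 : (3 + (k : Int) + 1 - 2).toNat = (3 + (k : Int) - 2).toNat + 1 := by omega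
      rw [h1, pow_succ]
      ring
  have hk : n = 3 + ((n - 3).toNat : Int) := by omega
  rw [hk] at *
  exact h (n - 3).toNat

lemma arecGo_eq_alt : ∀ (f : Nat) (n : Int), n.toNat < f → arecGo f n = algorithm_recursive_alt n := by
  intro f
  induction f with
  | zero => intro n h; omega
  | succ g ih =>
    intro n hn
    unfold arecGo
    by_cases h12 : n = 1 ∨ n = 2
    · rw [if_pos h12]
      unfold algorithm_recursive_alt
      rcases h12 with h | h <;> subst h <;> decide
    · rw [if_neg h12]
      have hcongr : (PySem.List.pyRange 1 n 1).foldl (fun s i => s + arecGo g i) 0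
          = (PySem.List.pyRange 1 n 1).foldl (fun s i => s + algorithm_recursive_alt i) 0 := by
        apply PySem.List.foldl_congr_mem
        intro acc x hx
        have hx' := (PySem.List.mem_pyRange_one).1 hx
        rw [ih x (by omega)]
      rw [hcongr]
      by_cases hle : n ≤ 0
      · rw [PySem.List.pyRange_one_eq_nil (by omega)]
        unfold algorithm_recursive_alt
        rw [if_pos hle]
        rfl
      · have h3 : 3 ≤ n := by omega
        rw [arec_sum_closed n h3]
        unfold algorithm_recursive_alt
        rw [if_neg (by omega), if_neg (by omega)]

-- ===== VERDICT (by name: the statement is the Claim_ definition above) =====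
theorem algorithm_recursive_spec : Claim_equal_algorithm_recursive := by
  intro n _
  unfold Spec_algorithm_recursive algorithm_recursive
  exact arecGo_eq_alt (n.toNat + 1) n (by omega)
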